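-- pv_equiv track=rewrite | github.com/rohansaeed/study_scripts | python_studies/lists/solution_test8.py | repeat_char_jump
-- ===== SOURCE A (Python) =====
-- def repeat_char_jump(inputString, k):
--     result = ''
--     counter = 0
--     str_len = len(inputString)
--
--     for i in range(str_len):
--         result += inputString[counter]
--         counter = ((counter+k)%str_len)
--
--
--     return(result)
-- ===== SOURCE B (Python) =====
-- def repeat_char_jump(inputString, k):
--     n = len(inputString)
--     if n == 0:
--         return ''
--     step = k % n
--     # period of the visited-index cycle: n // gcd(step, n); gcd by Euclid's loop
--     g = n
--     r = step
--     while r: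
--         g, r = r, g % r
--     period = n // g
--     cycle = ''.join(inputString[(j * step) % n] for j in range(period))
--     return cycle * g
-- ===== Notes on version B (the rewrite author's own statement) =====
-- stated objective: alternative
-- what changed: Instead of walking a running counter through all n positions, B computes the cycle structure: the visited indices j*(k%n)%n repeat with period n//gcd(k%n,n), so B builds one period of the cycle and tiles it gcd many times by string repetition (gcd computed by an explicit Euclid loop).
import Mathlib
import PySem

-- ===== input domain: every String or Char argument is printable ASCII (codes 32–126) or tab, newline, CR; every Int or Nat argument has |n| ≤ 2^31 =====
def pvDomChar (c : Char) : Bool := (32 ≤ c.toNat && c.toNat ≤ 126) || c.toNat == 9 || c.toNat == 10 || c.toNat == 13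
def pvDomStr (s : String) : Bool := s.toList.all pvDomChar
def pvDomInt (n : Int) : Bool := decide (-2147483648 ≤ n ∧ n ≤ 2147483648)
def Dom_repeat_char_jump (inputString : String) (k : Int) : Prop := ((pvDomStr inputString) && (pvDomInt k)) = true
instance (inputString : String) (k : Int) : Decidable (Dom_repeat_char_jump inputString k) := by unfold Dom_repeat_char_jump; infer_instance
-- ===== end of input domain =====

-- B replaces A's counter walk over all n positions by cycle tiling: the visited indices have
-- period n/gcd(k%n,n), so B builds one period and repeats it gcd times (objective: alternative).

-- ===== PORT A =====
-- literal port: result accumulator + counter stepped by (counter+k) % str_len each iteration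
-- (inputString[counter] is ported with pyGet?; counter is always in range, so the .getD ' ' default is unreachable)
def repeat_char_jump (inputString : String) (k : Int) : String :=
  String.ofList ((PySem.List.pyRange 0 (inputString.toList.length : Int) 1).foldl
    (fun (st : List Char × Int) _ =>
      (st.1 ++ [(PySem.Chars.pyGet? inputString.toList st.2).getD ' '],
       PySem.Int.mod (st.2 + k) (inputString.toList.length : Int)))
    ([], 0)).1

-- ===== PORT B =====
-- port of Source B's Euclid while-loop 'while r: g, r = r, g % r' (state (g, r), recursion on r)
def pvGcdLoop : Nat → Nat → Nat
  | g, 0 => g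
  | g, (r + 1) => pvGcdLoop (r + 1) (g % (r + 1))
decreasing_by exact Nat.mod_lt _ (Nat.succ_pos r)

-- literal port of Source B: step = k % n, g = gcd via the loop above, one period built by
-- closed-form indices, then tiled g times ('cycle * g' = flatten of g copies)
def repeat_char_jump_alt (inputString : String) (k : Int) : String :=
  let cs := inputString.toList
  let n := cs.length
  if n = 0 then "" else
    let step := PySem.Int.mod k (n : Int)
    let g := pvGcdLoop n step.toNat
    let period := n / g
    let cycle := (List.range period).map
      (fun j : Nat => (PySem.Chars.pyGet? cs (PySem.Int.mod ((j : Int) * step) (n : Int))).getD ' ')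
    String.ofList (List.flatten (List.replicate g cycle))

-- ===== PRECONDITION & SPEC =====
def Spec_repeat_char_jump (inputString : String) (k : Int) (out : String) : Prop := out = repeat_char_jump_alt inputString k
instance (inputString : String) (k : Int) (out : String) : Decidable (Spec_repeat_char_jump inputString k out) := by unfold Spec_repeat_char_jump; infer_instance

-- ===== CLAIM (what is proved, stated in full; the proofs are below) =====
def Claim_equal_repeat_char_jump : Prop := ∀ (inputString : String) (k : Int), Dom_repeat_char_jump inputString k → Spec_repeat_char_jump inputString k (repeat_char_jump inputString k)

-- ===== LEMMAS AND PROOFS =====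

-- A's loop body ignores the loop variable, so the fold over any index list depends only on its
-- length; with the counter kept reduced (0 ≤ c < n) the result is the closed-form map.
theorem pv_loop_closed (cs : List Char) (k : Int) (hn : 0 < (cs.length : Int)) :
    ∀ (l : List Int) (c : Int) (acc : List Char), 0 ≤ c → c < (cs.length : Int) →
    l.foldl
      (fun (st : List Char × Int) _ =>
        (st.1 ++ [(PySem.Chars.pyGet? cs st.2).getD ' '], PySem.Int.mod (st.2 + k) (cs.length : Int)))
      (acc, c)
    = (acc ++ (List.range l.length).map
        (fun (i : Nat) => (PySem.Chars.pyGet? cs (PySem.Int.mod (c + (i : Int) * k) (cs.length : Int))).getD ' '),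
       PySem.Int.mod (c + (l.length : Int) * k) (cs.length : Int)) := by
  intro l
  induction l with
  | nil =>
    intro c acc hc0 hcn
    simp [PySem.Int.mod_eq_emod_of_pos hn, Int.emod_eq_of_lt hc0 hcn]
  | cons x t ih =>
    intro c acc hc0 hcn
    have h1 : 0 ≤ PySem.Int.mod (c + k) (cs.length : Int) := PySem.Int.mod_nonneg _ hn
    have h2 : PySem.Int.mod (c + k) (cs.length : Int) < (cs.length : Int) := PySem.Int.mod_lt _ hn
    simp only [List.foldl_cons]
    rw [ih _ _ h1 h2]
    simp only [Prod.mk.injEq, List.length_cons]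
    constructor
    · rw [List.range_succ_eq_map, List.map_cons, List.append_assoc]
      simp only [PySem.Int.mod_eq_emod_of_pos hn, List.singleton_append]
      rw [List.map_map]
      refine congrArg (fun l => acc ++ l) ?_
      refine List.cons_eq_cons.mpr ⟨?_, ?_⟩
      · simp [Int.emod_eq_of_lt hc0 hcn]
      · apply List.map_congr_left
        intro i _
        simp only [Function.comp_apply]
        rw [Int.emod_add_emod]
        have harg : c + k + (i : Int) * k = c + ((i : Int) + 1) * k := by ring
        rw [harg]
        push_cast
        ring_nf
    · simp only [PySem.Int.mod_eq_emod_of_pos hn]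
      rw [Int.emod_add_emod]
      congr 1
      push_cast
      ring

-- the Euclid loop computes gcd
theorem pvGcdLoop_eq_gcd : ∀ (r g : Nat), pvGcdLoop g r = Nat.gcd g r := by
  intro r
  induction r using Nat.strong_induction_on with
  | _ r ih =>
    intro g
    match r with
    | 0 => simp [pvGcdLoop]
    | r + 1 =>
      rw [pvGcdLoop, ih (g % (r + 1)) (Nat.mod_lt _ (Nat.succ_pos r))]
      rw [Nat.gcd_comm (r + 1), ← Nat.gcd_rec, Nat.gcd_comm]

-- tiling: a map over range (g*p) whose values are p-periodic is g copies of one period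
theorem pv_blocks {α : Type} (f fc : Nat → α) (p : Nat)
    (hf : ∀ t j, j < p → f (t * p + j) = fc j) :
    ∀ g : Nat, (List.range (g * p)).map f = List.flatten (List.replicate g ((List.range p).map fc)) := by
  intro g
  induction g with
  | zero => simp
  | succ g ih =>
    have : (g + 1) * p = g * p + p := by ring
    rw [this, List.range_add, List.map_append, ih, List.replicate_succ', List.flatten_append]
    simp only [List.flatten_cons, List.flatten_nil, List.append_nil]
    congr 1
    rw [List.map_map]
    apply List.map_congr_left
    intro j hj
    exact hf g j (List.mem_range.mp hj)

-- index arithmetic: with step = k % n and p * step = n * s', the visited index is p-periodic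
theorem pv_idx (k n step s' : Int) (hstep : step = k % n)
    (p : Nat) (hps : (p : Int) * step = n * s') (t j : Nat) :
    ((((t * p + j : Nat)) : Int) * k) % n = ((j : Int) * step) % n := by
  have hk : Int.ModEq n k step := by
    unfold Int.ModEq
    rw [hstep, Int.emod_emod_of_dvd _ dvd_rfl]
  have h1 : Int.ModEq n (((t * p + j : Nat) : Int) * k) (((t * p + j : Nat) : Int) * step) :=
    hk.mul_left _
  have h2 : Int.ModEq n (((t * p + j : Nat) : Int) * step) ((j : Int) * step) := by
    rw [Int.modEq_iff_dvd]
    refine ⟨-((t : Int) * s'), ?_⟩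
    push_cast
    linear_combination (-(t : Int)) * hps
  exact h1.trans h2

-- B's tiling (one period repeated gcd times) equals the full closed-form index map
theorem pv_tile (cs : List Char) (k : Int) (hnpos : 0 < cs.length) :
    List.flatten (List.replicate (pvGcdLoop cs.length (PySem.Int.mod k (cs.length : Int)).toNat)
      ((List.range (cs.length / pvGcdLoop cs.length (PySem.Int.mod k (cs.length : Int)).toNat)).map
        (fun j : Nat => (PySem.Chars.pyGet? cs
          (PySem.Int.mod ((j : Int) * PySem.Int.mod k (cs.length : Int)) (cs.length : Int))).getD ' ')))
    = (List.range cs.length).map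
        (fun i : Nat => (PySem.Chars.pyGet? cs (PySem.Int.mod ((i : Int) * k) (cs.length : Int))).getD ' ') := by
  set n : Nat := cs.length with hn'
  have hn : 0 < (n : Int) := by exact_mod_cast hnpos
  set stepI : Int := PySem.Int.mod k (n : Int) with hstepI
  have hstep0 : 0 ≤ stepI := PySem.Int.mod_nonneg _ hn
  set sN : Nat := stepI.toNat with hsN
  have hstepN : ((sN : Nat) : Int) = stepI := Int.toNat_of_nonneg hstep0
  set g : Nat := pvGcdLoop n sN with hg
  have hgcd : g = Nat.gcd n sN := pvGcdLoop_eq_gcd sN n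
  have hgn : g ∣ n := hgcd ▸ Nat.gcd_dvd_left n sN
  have hgs : g ∣ sN := hgcd ▸ Nat.gcd_dvd_right n sN
  set p : Nat := n / g with hp
  have hgp : g * p = n := Nat.mul_div_cancel' hgn
  obtain ⟨s', hs'⟩ := hgs
  have hps : p * sN = n * s' := by
    calc p * sN = p * (g * s') := by rw [hs']
      _ = (g * p) * s' := by ring
      _ = n * s' := by rw [hgp]
  have hpsI : (p : Int) * stepI = (n : Int) * (s' : Int) := by
    rw [← hstepN]; exact_mod_cast hps
  have hrange : n = g * p := hgp.symm
  rw [show List.range n = List.range (g * p) from by rw [hgp]]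
  refine (pv_blocks _ _ p ?_ g).symm
  intro t' j hj
  have hidx := pv_idx k (n : Int) stepI (s' : Int)
    (by rw [hstepI, PySem.Int.mod_eq_emod_of_pos hn]) p hpsI t' j
  simp only [PySem.Int.mod_eq_emod_of_pos hn]
  rw [hidx]

-- ===== VERDICT (by name: the statement is the Claim_ definition above) =====
theorem repeat_char_jump_spec : Claim_equal_repeat_char_jump := by
  intro inputString k _
  unfold Spec_repeat_char_jump repeat_char_jump repeat_char_jump_alt
  rcases h : inputString.toList with _ | ⟨a, t⟩
  · simp
  · have hnpos : 0 < (a :: t : List Char).length := by simp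
    have hn : 0 < (((a :: t : List Char).length : Nat) : Int) := by exact_mod_cast hnpos
    have hne : ¬ (a :: t : List Char).length = 0 := by omega
    simp only [if_neg hne]
    rw [pv_loop_closed (a :: t) k hn _ 0 [] le_rfl hn]
    simp only [List.nil_append, zero_add, PySem.List.length_pyRange_one, Int.sub_zero,
      Int.toNat_natCast]
    exact congrArg String.ofList (pv_tile (a :: t) k hnpos).symm
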